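-- pv_equiv track=rewrite | github.com/AmT42/BioAIHackathon-DeltaWave-nanoSpec | backend/app/agent/tools/sources/knowledge_graph.py | _alias_hint_from_node_id
-- ===== SOURCE A (Python) =====
-- _ID_PREFIX_ALIAS_HINTS: tuple[tuple[str, str], ...] = (
--     ("drugbank:", "drug"),
--     ("chembl.compound:", "drug"),
--     ("chembl:", "drug"),
--     ("pubchem.compound:", "compound"),
--     ("chebi:", "compound"),
--     ("uniprot:", "protein"),
--     ("ensembl:", "gene"),
--     ("entrez:", "gene"),
--     ("ncbigene:", "gene"),
--     ("mondo:", "disease"),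
--     ("doid:", "disease"),
--     ("mesh:", "disease"),
--     ("efo:", "disease"),
-- )
--
-- def _alias_hint_from_node_id(node_id: str) -> str | None:
--     lowered = str(node_id or "").strip().lower()
--     if not lowered:
--         return None
--     for prefix, alias in _ID_PREFIX_ALIAS_HINTS:
--         if lowered.startswith(prefix):
--             return alias
--     return None
-- ===== SOURCE B (Python) =====
-- _ALIAS_BY_TOKEN = {
--     "drugbank": "drug",
--     "chembl.compound": "drug",
--     "chembl": "drug",
--     "pubchem.compound": "compound",
--     "chebi": "compound",
--     "uniprot": "protein",
--     "ensembl": "gene",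
--     "entrez": "gene",
--     "ncbigene": "gene",
--     "mondo": "disease",
--     "doid": "disease",
--     "mesh": "disease",
--     "efo": "disease",
-- }
--
--
-- def _alias_hint_from_node_id(node_id: str) -> str | None:
--     key, colon, _rest = str(node_id or "").strip().lower().partition(":")
--     if not colon:
--         return None
--     return _ALIAS_BY_TOKEN.get(key)
-- ===== Notes on version B (the rewrite author's own statement) =====
-- stated objective: idiomatic
-- what changed: Replaced the ordered scan of 13 startswith prefix tests by a single partition at the first colon plus one keyed dict lookup of the before-colon token.
import Mathlib
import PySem

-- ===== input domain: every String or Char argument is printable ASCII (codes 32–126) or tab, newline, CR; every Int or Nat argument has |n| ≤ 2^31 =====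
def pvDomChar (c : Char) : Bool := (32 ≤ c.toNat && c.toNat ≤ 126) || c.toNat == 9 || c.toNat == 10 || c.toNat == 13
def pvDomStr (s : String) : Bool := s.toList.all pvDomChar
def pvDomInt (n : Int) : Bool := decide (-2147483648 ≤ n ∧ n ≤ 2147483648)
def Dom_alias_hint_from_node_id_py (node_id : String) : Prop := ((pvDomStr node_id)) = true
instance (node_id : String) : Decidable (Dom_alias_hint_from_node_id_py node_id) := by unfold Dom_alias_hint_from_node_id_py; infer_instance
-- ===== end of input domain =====

-- B replaces A's ordered scan of 13 startswith prefix tests by one partition at the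
-- first colon and a single keyed dictionary lookup of the before-colon token (idiomatic).

-- ===== PORT A =====
-- the module constant _ID_PREFIX_ALIAS_HINTS
def pvHints : List (String × String) :=
  [("drugbank:", "drug"), ("chembl.compound:", "drug"), ("chembl:", "drug"),
   ("pubchem.compound:", "compound"), ("chebi:", "compound"),
   ("uniprot:", "protein"),
   ("ensembl:", "gene"), ("entrez:", "gene"), ("ncbigene:", "gene"),
   ("mondo:", "disease"), ("doid:", "disease"), ("mesh:", "disease"), ("efo:", "disease")]

-- the 'for prefix, alias in _ID_PREFIX_ALIAS_HINTS' loop with its early return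
def pvALoop (lowered : String) : List (String × String) → Option String
  | [] => none
  | (p, a) :: rest => if PySem.Str.startswith lowered p then some a else pvALoop lowered rest

def alias_hint_from_node_id_py (node_id : String) : Option String :=
  -- str(node_id or "") is node_id itself for every string argument
  let lowered := PySem.Str.lower (PySem.Str.strip node_id)
  if lowered = "" then none else pvALoop lowered pvHints

-- ===== PORT B =====
-- hand port of str.partition(":") (not in PySem): exact — returns (text before the
-- first ':', whether a ':' occurs, text after it); Python's third value is unused by B.
def pvPartitionColon : List Char → List Char × Bool × List Char
  | [] => ([], false, [])
  | c :: rest =>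
      if c = ':' then ([], true, rest)
      else
        let p := pvPartitionColon rest
        (c :: p.1, p.2.1, p.2.2)

-- the module constant _ALIAS_BY_TOKEN (a Python dict literal)
def pvAliasByToken : PySem.Dict String String :=
  PySem.Dict.ofList
    [("drugbank", "drug"), ("chembl.compound", "drug"), ("chembl", "drug"),
     ("pubchem.compound", "compound"), ("chebi", "compound"),
     ("uniprot", "protein"),
     ("ensembl", "gene"), ("entrez", "gene"), ("ncbigene", "gene"),
     ("mondo", "disease"), ("doid", "disease"), ("mesh", "disease"), ("efo", "disease")]

def alias_hint_from_node_id_py_alt (node_id : String) : Option String :=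
  let lowered := PySem.Str.lower (PySem.Str.strip node_id)
  let p := pvPartitionColon lowered.toList
  if p.2.1 then PySem.Dict.get? pvAliasByToken (String.ofList p.1) else none

-- ===== PRECONDITION & SPEC =====
def Spec_alias_hint_from_node_id_py (node_id : String) (out : Option String) : Prop := out = alias_hint_from_node_id_py_alt node_id
instance (node_id : String) (out : Option String) : Decidable (Spec_alias_hint_from_node_id_py node_id out) := by unfold Spec_alias_hint_from_node_id_py; infer_instance

-- ===== CLAIM (what is proved, stated in full; the proofs are below) =====
def Claim_equal_alias_hint_from_node_id_py : Prop := ∀ (node_id : String), Dom_alias_hint_from_node_id_py node_id → Spec_alias_hint_from_node_id_py node_id (alias_hint_from_node_id_py node_id)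

-- ===== LEMMAS AND PROOFS =====

-- literal string against a rebuilt char list, as Bool equality
theorem pv_beq_ofList (s : String) (k : List Char) :
    (s == String.ofList k) = (k == s.toList) := by
  by_cases h : k = s.toList
  · subst h
    simp
  · have h2 : s ≠ String.ofList k := fun hc => h (by rw [hc, String.toList_ofList])
    simp [h, h2]

-- 'lowered.startswith(token + ":")' in terms of the partition at the first colon
theorem pv_startswith_colon (w : List Char) (p t : List Char)
    (hp : p = t ++ [':']) (ht : ':' ∉ t) :
    PySem.Chars.startswith w p =
      ((pvPartitionColon w).2.1 && ((pvPartitionColon w).1 == t)) := by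
  subst hp
  induction w generalizing t with
  | nil =>
      cases t <;> simp [PySem.Chars.startswith, pvPartitionColon]
  | cons c w' ih =>
      cases t with
      | nil =>
          by_cases hc : c = ':'
          · subst hc; simp [PySem.Chars.startswith, List.isPrefixOf, pvPartitionColon]
          · simp [PySem.Chars.startswith, List.isPrefixOf, pvPartitionColon, hc,
                  Ne.symm hc]
      | cons a t' =>
          have ha : a ≠ ':' := fun h => ht (h ▸ List.mem_cons_self)
          have ht' : ':' ∉ t' := fun h => ht (List.mem_cons_of_mem _ h)
          by_cases hc : c = ':'
          · subst hc
            simp [PySem.Chars.startswith, List.isPrefixOf, pvPartitionColon,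
                  beq_eq_false_iff_ne.mpr ha]
          · by_cases hac : a = c
            · subst hac
              have := ih t' ht'
              simp [PySem.Chars.startswith, pvPartitionColon, hc] at this ⊢
              simp [this]
            · have h1 : (a == c) = false := beq_eq_false_iff_ne.mpr hac
              have h2 : (c == a) = false := beq_eq_false_iff_ne.mpr (Ne.symm hac)
              simp [PySem.Chars.startswith, List.isPrefixOf, pvPartitionColon, hc, h1, h2]

-- the dict lookup as the same chain of token comparisons, over the partition key
theorem pv_lookup_chain (k : List Char) :
    PySem.Dict.get? pvAliasByToken (String.ofList k) =
      (if k == "drugbank".toList then some "drug"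
       else if k == "chembl.compound".toList then some "drug"
       else if k == "chembl".toList then some "drug"
       else if k == "pubchem.compound".toList then some "compound"
       else if k == "chebi".toList then some "compound"
       else if k == "uniprot".toList then some "protein"
       else if k == "ensembl".toList then some "gene"
       else if k == "entrez".toList then some "gene"
       else if k == "ncbigene".toList then some "gene"
       else if k == "mondo".toList then some "disease"
       else if k == "doid".toList then some "disease"
       else if k == "mesh".toList then some "disease"
       else if k == "efo".toList then some "disease"
       else none) := by
  have hit : pvAliasByToken.items =
    [("drugbank", "drug"), ("chembl.compound", "drug"), ("chembl", "drug"),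
     ("pubchem.compound", "compound"), ("chebi", "compound"),
     ("uniprot", "protein"),
     ("ensembl", "gene"), ("entrez", "gene"), ("ncbigene", "gene"),
     ("mondo", "disease"), ("doid", "disease"), ("mesh", "disease"), ("efo", "disease")] := by rfl
  simp only [PySem.Dict.get?, hit, List.find?, pv_beq_ofList]
  by_cases h0 : k = "drugbank".toList
  · simp [h0]
  · simp only [beq_eq_false_iff_ne.mpr h0, Bool.false_eq_true, if_false]
    by_cases h1 : k = "chembl.compound".toList
    · simp [h1]
    · simp only [beq_eq_false_iff_ne.mpr h1, Bool.false_eq_true, if_false]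
      by_cases h2 : k = "chembl".toList
      · simp [h2]
      · simp only [beq_eq_false_iff_ne.mpr h2, Bool.false_eq_true, if_false]
        by_cases h3 : k = "pubchem.compound".toList
        · simp [h3]
        · simp only [beq_eq_false_iff_ne.mpr h3, Bool.false_eq_true, if_false]
          by_cases h4 : k = "chebi".toList
          · simp [h4]
          · simp only [beq_eq_false_iff_ne.mpr h4, Bool.false_eq_true, if_false]
            by_cases h5 : k = "uniprot".toList
            · simp [h5]
            · simp only [beq_eq_false_iff_ne.mpr h5, Bool.false_eq_true, if_false]
              by_cases h6 : k = "ensembl".toList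
              · simp [h6]
              · simp only [beq_eq_false_iff_ne.mpr h6, Bool.false_eq_true, if_false]
                by_cases h7 : k = "entrez".toList
                · simp [h7]
                · simp only [beq_eq_false_iff_ne.mpr h7, Bool.false_eq_true, if_false]
                  by_cases h8 : k = "ncbigene".toList
                  · simp [h8]
                  · simp only [beq_eq_false_iff_ne.mpr h8, Bool.false_eq_true, if_false]
                    by_cases h9 : k = "mondo".toList
                    · simp [h9]
                    · simp only [beq_eq_false_iff_ne.mpr h9, Bool.false_eq_true, if_false]
                      by_cases h10 : k = "doid".toList
                      · simp [h10]
                      · simp only [beq_eq_false_iff_ne.mpr h10, Bool.false_eq_true, if_false]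
                        by_cases h11 : k = "mesh".toList
                        · simp [h11]
                        · simp only [beq_eq_false_iff_ne.mpr h11, Bool.false_eq_true, if_false]
                          by_cases h12 : k = "efo".toList
                          · simp [h12]
                          · simp only [beq_eq_false_iff_ne.mpr h12, Bool.false_eq_true, if_false]
                            rfl

-- ===== VERDICT (by name: the statement is the Claim_ definition above) =====
theorem alias_hint_from_node_id_py_spec : Claim_equal_alias_hint_from_node_id_py := by
  intro s _
  unfold Spec_alias_hint_from_node_id_py alias_hint_from_node_id_py alias_hint_from_node_id_py_alt
  generalize PySem.Str.lower (PySem.Str.strip s) = w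
  by_cases hw : w = ""
  · subst hw; decide
  · simp only [hw, if_false, pvALoop, pvHints]
    simp only [PySem.Str.startswith_eq]
    simp only [pv_startswith_colon w.toList "drugbank:".toList "drugbank".toList (by decide) (by decide),
        pv_startswith_colon w.toList "chembl.compound:".toList "chembl.compound".toList (by decide) (by decide),
        pv_startswith_colon w.toList "chembl:".toList "chembl".toList (by decide) (by decide),
        pv_startswith_colon w.toList "pubchem.compound:".toList "pubchem.compound".toList (by decide) (by decide),
        pv_startswith_colon w.toList "chebi:".toList "chebi".toList (by decide) (by decide),
        pv_startswith_colon w.toList "uniprot:".toList "uniprot".toList (by decide) (by decide),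
        pv_startswith_colon w.toList "ensembl:".toList "ensembl".toList (by decide) (by decide),
        pv_startswith_colon w.toList "entrez:".toList "entrez".toList (by decide) (by decide),
        pv_startswith_colon w.toList "ncbigene:".toList "ncbigene".toList (by decide) (by decide),
        pv_startswith_colon w.toList "mondo:".toList "mondo".toList (by decide) (by decide),
        pv_startswith_colon w.toList "doid:".toList "doid".toList (by decide) (by decide),
        pv_startswith_colon w.toList "mesh:".toList "mesh".toList (by decide) (by decide),
        pv_startswith_colon w.toList "efo:".toList "efo".toList (by decide) (by decide)]
    cases hf : (pvPartitionColon w.toList).2.1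
    · simp
    · simp [pv_lookup_chain]
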